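-- pv_equiv track=rewrite | github.com/XiaoheLiu/EPIJudge | epi_judge_python/nearest_repeated_entries.py | find_nearest_repetition
-- ===== SOURCE A (Python) =====
-- def find_nearest_repetition(paragraph):
--     nearest_repetition = float('inf')
--     word_to_index = {}
--
--     for i, word in enumerate(paragraph):
--         if word in word_to_index:
--             nearest_repetition = min(
--                 nearest_repetition, i - word_to_index[word])
--         word_to_index[word] = i
--
--     if nearest_repetition == float('inf'):
--         return -1
--     return nearest_repetition
-- ===== SOURCE B (Python) =====
-- def find_nearest_repetition(paragraph):
--     positions = {}
--     for i, word in enumerate(paragraph):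
--         positions.setdefault(word, []).append(i)
--     best = -1
--     for idxs in positions.values():
--         for prev, cur in zip(idxs, idxs[1:]):
--             gap = cur - prev
--             if best == -1 or gap < best:
--                 best = gap
--     return best
-- ===== Notes on version B (the rewrite author's own statement) =====
-- stated objective: alternative
-- what changed: Replaces A's single pass with a running last-seen index and float('inf') sentinel by a two-phase build-then-scan: first a dict mapping each word to the full list of its indices, then a scan of consecutive gaps in each occurrence list with a -1 sentinel.
import Mathlib
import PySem

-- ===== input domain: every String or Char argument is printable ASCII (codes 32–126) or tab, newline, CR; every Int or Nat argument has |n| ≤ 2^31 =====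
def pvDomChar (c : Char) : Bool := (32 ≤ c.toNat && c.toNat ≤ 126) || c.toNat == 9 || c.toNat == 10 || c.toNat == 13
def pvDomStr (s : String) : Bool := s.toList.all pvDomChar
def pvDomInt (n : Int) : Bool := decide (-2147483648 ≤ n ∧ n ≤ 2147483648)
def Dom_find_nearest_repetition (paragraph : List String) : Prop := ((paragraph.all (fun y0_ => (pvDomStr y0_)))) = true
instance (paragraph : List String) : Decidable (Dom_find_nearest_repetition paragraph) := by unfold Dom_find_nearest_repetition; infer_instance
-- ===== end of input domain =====

-- B replaces A's single pass (running last-seen index, float('inf') sentinel) by a two-phase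
-- build-then-scan: a dict mapping each word to all its indices, then a scan of consecutive
-- gaps per occurrence list with a -1 sentinel (alternative decomposition, same cost).

-- ===== PORT A =====
-- Python's float('inf') sentinel is modelled as `none : Option Int` (min(inf, x) = x).
def find_nearest_repetition (paragraph : List String) : Int :=
  let st := (PySem.List.enumerate paragraph 0).foldl
    (fun (st : Option Int × PySem.Dict String Int) iw =>
      let nr := match st.2.get? iw.2 with    -- `if word in word_to_index: ... word_to_index[word]`
        | some j => some (match st.1 with
            | none => iw.1 - j               -- min(inf, i - j) = i - j
            | some m => min m (iw.1 - j))
        | none => st.1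
      (nr, st.2.insert iw.2 iw.1))
    (none, PySem.Dict.empty)
  match st.1 with
  | none => -1       -- nearest_repetition == float('inf')
  | some m => m

-- ===== PORT B =====
def find_nearest_repetition_alt (paragraph : List String) : Int :=
  let positions := (PySem.List.enumerate paragraph 0).foldl
    (fun (d : PySem.Dict String (List Int)) iw => d.modify iw.2 [] (· ++ [iw.1]))
    PySem.Dict.empty                                             -- positions.setdefault(word, []).append(i)
  positions.values.foldl
    (fun best idxs =>
      (idxs.zip (PySem.List.slice idxs (some 1) none)).foldl     -- zip(idxs, idxs[1:])
        (fun b q =>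
          let gap := q.2 - q.1
          if b = -1 ∨ gap < b then gap else b)
        best)
    (-1)

-- ===== PRECONDITION & SPEC =====
def Spec_find_nearest_repetition (paragraph : List String) (out : Int) : Prop := out = find_nearest_repetition_alt paragraph
instance (paragraph : List String) (out : Int) : Decidable (Spec_find_nearest_repetition paragraph out) := by unfold Spec_find_nearest_repetition; infer_instance

-- ===== CLAIM (what is proved, stated in full; the proofs are below) =====
def Claim_equal_find_nearest_repetition : Prop := ∀ (paragraph : List String), Dom_find_nearest_repetition paragraph → Spec_find_nearest_repetition paragraph (find_nearest_repetition paragraph)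

-- ===== LEMMAS AND PROOFS =====

-- the indices (in order) at which `w` occurs in `p`
def pvOcc (p : List String) (w : String) : List Int :=
  ((PySem.List.enumerate p 0).filter (fun q => q.2 == w)).map (·.1)

-- consecutive gaps of an index list
def pvGaps (l : List Int) : List Int := (l.zip l.tail).map (fun q => q.2 - q.1)

-- all consecutive gaps, grouped by word (distinct words in first-occurrence order)
def pvAllGaps (p : List String) : List Int :=
  (PySem.Set.ofList p).flatMap (fun w => pvGaps (pvOcc p w))

-- optional minimum (none = +inf), as a fold step
def pvOptMin (o : Option Int) (g : Int) : Option Int :=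
  some (match o with | none => g | some m => min m g)

def pvToRes : Option Int → Int
  | none => -1
  | some m => m

-- B's sentinel min step
def pvSStep (b g : Int) : Int := if b = -1 ∨ g < b then g else b

-- A's loop step (definitionally equal to the lambda in the port)
def pvAStep (st : Option Int × PySem.Dict String Int) (iw : Int × String) :
    Option Int × PySem.Dict String Int :=
  (match st.2.get? iw.2 with
   | some j => pvOptMin st.1 (iw.1 - j)
   | none => st.1,
   st.2.insert iw.2 iw.1)

theorem pvA_eq (p : List String) :
    find_nearest_repetition p
      = pvToRes (((PySem.List.enumerate p 0).foldl pvAStep (none, PySem.Dict.empty)).1) := rfl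

theorem pvOcc_append (p : List String) (x w : String) :
    pvOcc (p ++ [x]) w = pvOcc p w ++ (if x = w then [(p.length : Int)] else []) := by
  unfold pvOcc
  rw [PySem.List.enumerate_append, List.filter_append, List.map_append]
  congr 1
  simp [PySem.List.enumerate_cons, PySem.List.enumerate_nil]
  split <;> simp_all

theorem pvOcc_eq_nil_iff (p : List String) (w : String) : pvOcc p w = [] ↔ w ∉ p := by
  induction p using List.reverseRecOn with
  | nil => simp [pvOcc, PySem.List.enumerate_nil]
  | append_singleton p x ih =>
    rw [pvOcc_append]
    constructor
    · intro h
      rcases List.append_eq_nil_iff.mp h with ⟨h1, h2⟩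
      intro hw
      rcases List.mem_append.mp hw with h | h
      · exact ih.mp h1 h
      · have : w = x := by simpa using h
        simp [this] at h2
    · intro hw
      have hxw : ¬ x = w := fun e => hw (by simp [e])
      simp [hxw, ih.mpr (fun h => hw (by simp [h]))]

theorem pvGaps_append_last (l : List Int) (m n : Int) (h : l.getLast? = some m) :
    pvGaps (l ++ [n]) = pvGaps l ++ [n - m] := by
  induction l generalizing m with
  | nil => simp at h
  | cons a t ih =>
    cases t with
    | nil => simp_all [pvGaps]
    | cons b t' =>
      have h' : (b :: t').getLast? = some m := by
        rwa [List.getLast?_cons_cons] at h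
      have := ih m h'
      simp only [pvGaps, List.cons_append, List.tail_cons, List.zip_cons_cons,
        List.map_cons] at this ⊢
      rw [← this]

theorem pvOptMin_swap (a : Option Int) (g h : Int) :
    pvOptMin (pvOptMin a g) h = pvOptMin (pvOptMin a h) g := by
  cases a <;> simp [pvOptMin, min_comm, min_left_comm]

theorem pv_foldl_optMin_out (L : List Int) :
    ∀ a g, L.foldl pvOptMin (pvOptMin a g) = pvOptMin (L.foldl pvOptMin a) g := by
  induction L with
  | nil => intro a g; rfl
  | cons h L ih =>
    intro a g
    simp only [List.foldl_cons]
    rw [pvOptMin_swap, ih]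

-- inserting one extra gap at the (unique) position of x inside the grouped fold
theorem pv_K (x : String) (g : Int) (f f' : String → List Int)
    (hfx : f' x = f x ++ [g]) :
    ∀ (u : List String), u.Nodup → x ∈ u → (∀ w ∈ u, w ≠ x → f' w = f w) →
    ∀ a, (u.flatMap f').foldl pvOptMin a = pvOptMin ((u.flatMap f).foldl pvOptMin a) g := by
  intro u
  induction u with
  | nil => simp
  | cons y u ih =>
    intro hnd hx hne a
    simp only [List.flatMap_cons, List.foldl_append]
    by_cases hyx : y = x
    · subst hyx
      have hnotin : y ∉ u := (List.nodup_cons.mp hnd).1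
      have hcong : u.flatMap f' = u.flatMap f := by
        apply List.flatMap_congr
        exact fun w hw => hne w (by simp [hw]) (fun e => hnotin (e ▸ hw))
      rw [hcong, hfx, List.foldl_append]
      simp only [List.foldl_cons, List.foldl_nil]
      exact pv_foldl_optMin_out _ _ _
    · have hx' : x ∈ u := by
        rcases List.mem_cons.mp hx with h | h
        · exact absurd h.symm hyx
        · exact h
      rw [hne y (by simp) hyx,
        ih (List.nodup_cons.mp hnd).2 hx' (fun w hw hwx => hne w (by simp [hw]) hwx)]

-- A's loop invariant: the running minimum is the fold of all grouped gaps,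
-- and the dict holds the last occurrence of each word
theorem pv_A_inv (p : List String) :
    ((PySem.List.enumerate p 0).foldl pvAStep (none, PySem.Dict.empty)).1
        = (pvAllGaps p).foldl pvOptMin none
    ∧ ∀ w, ((PySem.List.enumerate p 0).foldl pvAStep (none, PySem.Dict.empty)).2.get? w
        = (pvOcc p w).getLast? := by
  induction p using List.reverseRecOn with
  | nil =>
    constructor
    · rfl
    · intro w; simp [PySem.List.enumerate_nil, PySem.Dict.get?_empty, pvOcc]
  | append_singleton p x ih =>
    obtain ⟨ih1, ih2⟩ := ih
    have henum : PySem.List.enumerate (p ++ [x]) 0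
        = PySem.List.enumerate p 0 ++ [((p.length : Int), x)] := by
      rw [PySem.List.enumerate_append]
      simp [PySem.List.enumerate_cons, PySem.List.enumerate_nil]
    rw [henum, List.foldl_append, List.foldl_cons, List.foldl_nil]
    set st := (PySem.List.enumerate p 0).foldl pvAStep (none, PySem.Dict.empty) with hst
    by_cases hx : x ∈ p
    · -- repeated word: one new gap (p.length - last occurrence of x)
      have hocc_ne : pvOcc p x ≠ [] := fun h => (pvOcc_eq_nil_iff p x).mp h hx
      obtain ⟨m, hm⟩ := Option.isSome_iff_exists.mp (List.getLast?_isSome.mpr hocc_ne)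
      have hget : st.2.get? x = some m := by rw [ih2 x, hm]
      have hofl : PySem.Set.ofList (p ++ [x]) = PySem.Set.ofList p := by
        rw [PySem.Set.ofList_append_singleton,
          PySem.Set.add_of_mem ((PySem.Set.mem_ofList p x).mpr hx)]
      have hfx : pvGaps (pvOcc (p ++ [x]) x) = pvGaps (pvOcc p x) ++ [(p.length : Int) - m] := by
        rw [pvOcc_append, if_pos rfl]
        exact pvGaps_append_last _ m _ hm
      have hne : ∀ w ∈ PySem.Set.ofList p, w ≠ x →
          pvGaps (pvOcc (p ++ [x]) w) = pvGaps (pvOcc p w) := by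
        intro w _ hwx
        rw [pvOcc_append, if_neg (fun e : x = w => hwx e.symm), List.append_nil]
      constructor
      · show (match st.2.get? x with
          | some j => pvOptMin st.1 ((p.length : Int) - j)
          | none => st.1) = _
        rw [hget]
        unfold pvAllGaps
        rw [hofl,
          pv_K x ((p.length : Int) - m) (fun w => pvGaps (pvOcc p w))
            (fun w => pvGaps (pvOcc (p ++ [x]) w)) hfx (PySem.Set.ofList p)
            (PySem.Set.nodup_ofList p) ((PySem.Set.mem_ofList p x).mpr hx) hne none]
        show pvOptMin st.1 _ = _
        rw [ih1]
        rfl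
      · intro w
        show (st.2.insert x (p.length : Int)).get? w = _
        rw [PySem.Dict.get?_insert]
        rw [pvOcc_append]
        by_cases hwx : w = x
        · subst hwx
          simp
        · rw [if_neg (fun e : x = w => hwx e.symm), List.append_nil, if_neg hwx, ih2 w]
    · -- fresh word: no new gap
      have hocc : pvOcc p x = [] := (pvOcc_eq_nil_iff p x).mpr hx
      have hget : st.2.get? x = none := by rw [ih2 x, hocc]; rfl
      have hofl : PySem.Set.ofList (p ++ [x]) = PySem.Set.ofList p ++ [x] := by
        rw [PySem.Set.ofList_append_singleton,
          PySem.Set.add_of_not_mem (fun h => hx ((PySem.Set.mem_ofList p x).mp h))]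
      have hall : pvAllGaps (p ++ [x]) = pvAllGaps p := by
        unfold pvAllGaps
        rw [hofl, List.flatMap_append]
        have h1 : (PySem.Set.ofList p).flatMap (fun w => pvGaps (pvOcc (p ++ [x]) w))
            = (PySem.Set.ofList p).flatMap (fun w => pvGaps (pvOcc p w)) := by
          apply List.flatMap_congr
          intro w hw
          have hwx : ¬ x = w := fun e => hx (e ▸ (PySem.Set.mem_ofList p w).mp hw)
          rw [pvOcc_append, if_neg hwx, List.append_nil]
        have h2 : ([x] : List String).flatMap (fun w => pvGaps (pvOcc (p ++ [x]) w)) = [] := by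
          simp only [List.flatMap_cons, List.flatMap_nil, List.append_nil]
          rw [pvOcc_append]
          simp [hocc, pvGaps]
        rw [h1, h2, List.append_nil]
      constructor
      · show (match st.2.get? x with
          | some j => pvOptMin st.1 ((p.length : Int) - j)
          | none => st.1) = _
        rw [hget, hall, ih1]
      · intro w
        show (st.2.insert x (p.length : Int)).get? w = _
        rw [PySem.Dict.get?_insert, pvOcc_append]
        by_cases hwx : w = x
        · subst hwx
          simp [hocc]
        · rw [if_neg (fun e : x = w => hwx e.symm), List.append_nil, if_neg hwx, ih2 w]

-- B's grouping dict: lookup gives exactly the occurrence list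
theorem pos_getD (p : List String) (w : String) :
    ((PySem.List.enumerate p 0).foldl
      (fun (d : PySem.Dict String (List Int)) iw => d.modify iw.2 [] (· ++ [iw.1]))
      PySem.Dict.empty).getD w [] = pvOcc p w := by
  have h1 : ((PySem.List.enumerate p 0).foldl
      (fun (d : PySem.Dict String (List Int)) iw => d.modify iw.2 [] (· ++ [iw.1]))
      PySem.Dict.empty)
    = ((PySem.List.enumerate p 0).map (fun q => (q.2, q.1))).foldl
      (fun (d : PySem.Dict String (List Int)) r => d.modify r.1 [] (· ++ [r.2]))
      PySem.Dict.empty := by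
    rw [List.foldl_map]
  rw [h1, PySem.Dict.getD_foldl_modify_append, List.filter_map, List.map_map]
  simp [pvOcc, Function.comp_def]

-- B's grouping dict: keys are the distinct words in first-occurrence order
theorem pos_keys (p : List String) :
    ((PySem.List.enumerate p 0).foldl
      (fun (d : PySem.Dict String (List Int)) iw => d.modify iw.2 [] (· ++ [iw.1]))
      PySem.Dict.empty).keys = PySem.Set.ofList p := by
  rw [PySem.Dict.keys_foldl_modify_key (key := fun (iw : Int × String) => iw.2)]
  simp [PySem.List.map_snd_enumerate, PySem.Dict.keys_empty, PySem.Set.update_nil_left]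

-- bridge between B's -1 sentinel fold and the Option fold (all gaps positive)
theorem pv_bridge (L : List Int) (h : ∀ g ∈ L, 0 < g) :
    ∀ b o, ((b = -1 ∧ o = none) ∨ (o = some b ∧ 0 < b)) →
      ((L.foldl pvSStep b = -1 ∧ L.foldl pvOptMin o = none) ∨
       (L.foldl pvOptMin o = some (L.foldl pvSStep b) ∧ 0 < L.foldl pvSStep b)) := by
  induction L with
  | nil =>
    intro b o hbo
    rcases hbo with ⟨hb, ho⟩ | ⟨ho, hb⟩
    · exact Or.inl ⟨hb, ho⟩
    · exact Or.inr ⟨by simp [ho], hb⟩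
  | cons g L ih =>
    intro b o hbo
    have hg : 0 < g := h g (by simp)
    have h' : ∀ x ∈ L, 0 < x := fun x hx => h x (by simp [hx])
    simp only [List.foldl_cons]
    have hstep : (pvSStep b g = -1 ∧ pvOptMin o g = none) ∨
        (pvOptMin o g = some (pvSStep b g) ∧ 0 < pvSStep b g) := by
      rcases hbo with ⟨hb, ho⟩ | ⟨ho, hb⟩
      · subst hb ho
        right
        refine ⟨by simp [pvOptMin, pvSStep], by simp [pvSStep]; omega⟩
      · subst ho
        right
        constructor
        · simp only [pvOptMin, pvSStep]
          split <;> rename_i hc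
          · have : g < b := by omega
            simp [le_of_lt this]
          · push Not at hc
            simp [hc.2]
        · simp only [pvSStep]; split <;> omega
    exact ih h' _ _ hstep

theorem pvOcc_pairwise (p : List String) (w : String) : (pvOcc p w).Pairwise (· < ·) := by
  unfold pvOcc
  refine List.Pairwise.map _ (fun a b h => h) ?_
  exact (PySem.List.pairwise_lt_enumerate p 0).filter _

theorem pvGaps_pos {l : List Int} (hl : l.Pairwise (· < ·)) : ∀ g ∈ pvGaps l, 0 < g := by
  induction l with
  | nil => simp [pvGaps]
  | cons a l ih =>
    cases l with
    | nil => simp [pvGaps]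
    | cons b t =>
      intro g hg
      simp only [pvGaps, List.tail_cons, List.zip_cons_cons, List.map_cons, List.mem_cons] at hg
      rcases hg with h | h
      · have : a < b := (List.pairwise_cons.mp hl).1 b (by simp)
        omega
      · exact ih (List.pairwise_cons.mp hl).2 g (by simpa [pvGaps] using h)

theorem pvAllGaps_pos (p : List String) : ∀ g ∈ pvAllGaps p, 0 < g := by
  intro g hg
  simp only [pvAllGaps, List.mem_flatMap] at hg
  obtain ⟨w, _, hw⟩ := hg
  exact pvGaps_pos (pvOcc_pairwise p w) g hw

theorem pv_B_eq (p : List String) :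
    find_nearest_repetition_alt p = pvToRes ((pvAllGaps p).foldl pvOptMin none) := by
  unfold find_nearest_repetition_alt
  set positions := (PySem.List.enumerate p 0).foldl
      (fun (d : PySem.Dict String (List Int)) iw => d.modify iw.2 [] (· ++ [iw.1]))
      PySem.Dict.empty with hpos
  have hnodup : positions.keys.Nodup := by
    rw [pos_keys]; exact PySem.Set.nodup_ofList p
  have hvals : positions.values = (PySem.Set.ofList p).map (fun w => pvOcc p w) := by
    rw [PySem.Dict.values_eq_map_keys positions hnodup [], pos_keys]
    exact List.map_congr_left (fun w _ => pos_getD p w)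
  have hinner : ∀ (b : Int) (idxs : List Int),
      (idxs.zip (PySem.List.slice idxs (some 1) none)).foldl
        (fun b q => let gap := q.2 - q.1; if b = -1 ∨ gap < b then gap else b) b
      = (pvGaps idxs).foldl pvSStep b := by
    intro b idxs
    rw [PySem.List.slice_from_one, pvGaps, List.foldl_map]
    rfl
  have hB : positions.values.foldl
      (fun best idxs =>
        (idxs.zip (PySem.List.slice idxs (some 1) none)).foldl
          (fun b q => let gap := q.2 - q.1; if b = -1 ∨ gap < b then gap else b) best)
      (-1) = (pvAllGaps p).foldl pvSStep (-1) := by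
    rw [hvals, List.foldl_map,
      List.foldl_ext _ _ _ (fun b w _ => hinner b (pvOcc p w)),
      pvAllGaps, List.foldl_flatMap]
  rw [hB]
  rcases pv_bridge (pvAllGaps p) (pvAllGaps_pos p) (-1) none (Or.inl ⟨rfl, rfl⟩) with
    ⟨h1, h2⟩ | ⟨h1, h2⟩
  · rw [h1, h2]; rfl
  · rw [h1]; rfl

-- ===== VERDICT (by name: the statement is the Claim_ definition above) =====
theorem find_nearest_repetition_spec : Claim_equal_find_nearest_repetition := by
  intro p _
  show find_nearest_repetition p = find_nearest_repetition_alt p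
  rw [pvA_eq, (pv_A_inv p).1, pv_B_eq]
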